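-- pv_equiv track=rewrite | github.com/aiidaplugins/aiida-lammps | aiida_lammps/common/parse_trajectory.py | iter_step_lines
-- ===== SOURCE A (Python) =====
-- def iter_step_lines(file_obj):
--     step_content = None
--     init_line = 0
--     for i, line in enumerate(file_obj):
--         if "ITEM: TIMESTEP" in line:
--             if step_content is not None:
--                 yield init_line, step_content
--             init_line = i + 1
--             step_content = []
--         if step_content is not None:
--             step_content.append(line.strip())
--     if step_content is not None:
--         yield init_line, step_content
-- ===== SOURCE B (Python) =====
-- def iter_step_lines(file_obj):
--     lines = list(file_obj)
--     starts = [i for i, line in enumerate(lines) if "ITEM: TIMESTEP" in line]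
--     ends = starts[1:] + [len(lines)]
--     for j, e in zip(starts, ends):
--         yield j + 1, [line.strip() for line in lines[j:e]]
-- ===== Notes on version B (the rewrite author's own statement) =====
-- stated objective: alternative
-- what changed: B first materializes the lines and collects the indices of all 'ITEM: TIMESTEP' header lines, then emits each block by slicing between consecutive boundary indices, instead of A's single streaming pass with an Optional accumulator buffer.
import Mathlib
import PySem

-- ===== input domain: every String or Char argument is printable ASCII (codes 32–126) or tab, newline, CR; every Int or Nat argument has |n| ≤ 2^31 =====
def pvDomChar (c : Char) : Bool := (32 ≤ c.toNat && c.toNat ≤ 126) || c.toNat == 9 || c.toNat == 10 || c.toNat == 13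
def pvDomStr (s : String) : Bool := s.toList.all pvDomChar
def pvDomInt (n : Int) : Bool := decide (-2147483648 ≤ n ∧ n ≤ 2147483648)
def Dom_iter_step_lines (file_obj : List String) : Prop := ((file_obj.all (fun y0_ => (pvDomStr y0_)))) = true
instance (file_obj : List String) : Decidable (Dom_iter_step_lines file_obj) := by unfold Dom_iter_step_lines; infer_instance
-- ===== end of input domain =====

-- B collects the header-line indices first and slices blocks between consecutive boundaries,
-- instead of A's streaming buffer; same cost, different decomposition (objective: alternative).
-- Both generators are ported as the list of yielded pairs.

-- ===== PORT A =====
def pvHdr (line : String) : Bool := PySem.Str.isIn "ITEM: TIMESTEP" line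

-- the for-loop of A: state (index i, step_content, init_line), yields collected in order
def pvGoA : List String → Nat → Option (List String) → Int → List (Int × List String)
  | [], _, sc, init =>
      match sc with
      | none => []
      | some c => [(init, c)]
  | line :: rest, i, sc, init =>
      let (emitted, sc₁, init₁) :=
        if pvHdr line then
          ((match sc with
            | none => ([] : List (Int × List String))
            | some c => [(init, c)]), some ([] : List String), (i : Int) + 1)
        else ([], sc, init)
      let sc₂ := match sc₁ with
        | none => none
        | some c => some (c ++ [PySem.Str.strip line])
      emitted ++ pvGoA rest (i + 1) sc₂ init₁

def iter_step_lines (file_obj : List String) : List (Int × List String) :=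
  pvGoA file_obj 0 none 0

-- ===== PORT B =====
def iter_step_lines_alt (file_obj : List String) : List (Int × List String) :=
  let lines := file_obj
  let starts := (PySem.List.enumerate lines).filterMap
    (fun p => if pvHdr p.2 then some p.1 else none)
  let ends := starts.tail ++ [(lines.length : Int)]
  (starts.zip ends).map
    (fun p => (p.1 + 1, (PySem.List.slice lines (some p.1) (some p.2)).map PySem.Str.strip))

-- ===== PRECONDITION & SPEC =====
def Spec_iter_step_lines (file_obj : List String) (out : List (Int × List String)) : Prop := out = iter_step_lines_alt file_obj
instance (file_obj : List String) (out : List (Int × List String)) : Decidable (Spec_iter_step_lines file_obj out) := by unfold Spec_iter_step_lines; infer_instance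

-- ===== CLAIM (what is proved, stated in full; the proofs are below) =====
def Claim_equal_iter_step_lines : Prop := ∀ (file_obj : List String), Dom_iter_step_lines file_obj → Spec_iter_step_lines file_obj (iter_step_lines file_obj)

-- ===== LEMMAS AND PROOFS =====

-- relative header indices of a list of lines
def pvS : List String → List Nat
  | [] => []
  | l :: r => if pvHdr l then 0 :: (pvS r).map (· + 1) else (pvS r).map (· + 1)

-- B-shaped block builder over relative indices js, with absolute offset t
def pvM (t : Int) (xs : List String) (js : List Nat) : List (Int × List String) :=
  (js.zip (js.tail ++ [xs.length])).map
    (fun p => (t + p.1 + 1, ((xs.drop p.1).take (p.2 - p.1)).map PySem.Str.strip))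

theorem pvM_cons (t : Int) (xs : List String) (j : Nat) (js : List Nat) :
    pvM t xs (j :: js) =
      (t + j + 1, ((xs.drop j).take ((js ++ [xs.length]).headI - j)).map PySem.Str.strip)
        :: pvM t xs js := by
  cases js <;> simp [pvM]

theorem pvM_shift (t : Int) (l : String) (r : List String) (js : List Nat) :
    pvM t (l :: r) (js.map (· + 1)) = pvM (t + 1) r js := by
  unfold pvM
  have htail : (js.map (· + 1)).tail ++ [(l :: r).length] = (js.tail ++ [r.length]).map (· + 1) := by
    cases js <;> simp
  rw [htail, List.zip_map, List.map_map]
  apply List.map_congr_left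
  intro p _
  simp only [Function.comp, Prod.map, Prod.mk.injEq, List.drop_succ_cons,
    Nat.add_sub_add_right, and_true]
  push_cast; ring

theorem pvS_nil_takeWhile : ∀ r : List String, pvS r = [] →
    r.takeWhile (fun l => !pvHdr l) = r := by
  intro r
  induction r with
  | nil => intro _; rfl
  | cons l r ih =>
      intro h
      by_cases hl : pvHdr l
      · simp [pvS, hl] at h
      · simp only [pvS, hl, if_neg, Bool.false_eq_true, not_false_iff,
          List.map_eq_nil_iff] at h
        simp only [List.takeWhile_cons, hl, Bool.not_false, if_pos]
        rw [ih h]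

theorem pvS_cons_takeWhile : ∀ (r : List String) (j : Nat) (js : List Nat), pvS r = j :: js →
    r.takeWhile (fun l => !pvHdr l) = r.take j := by
  intro r
  induction r with
  | nil => intro j js h; simp [pvS] at h
  | cons l r ih =>
      intro j js h
      by_cases hl : pvHdr l
      · simp [pvS, hl] at h
        rw [← h.1]
        simp [hl]
      · simp only [pvS, hl, Bool.false_eq_true, if_neg, not_false_iff] at h
        cases hS : pvS r with
        | nil => rw [hS] at h; simp at h
        | cons j' js' =>
            rw [hS] at h
            simp only [List.map_cons, List.cons.injEq] at h
            obtain ⟨hj, -⟩ := h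
            rw [← hj]
            simp only [List.takeWhile_cons, hl, Bool.not_false, if_pos, List.take_succ_cons]
            rw [ih j' js' hS]

-- first block of pvM at a header at relative index 0
theorem pvM_cons_zero (t : Int) (l : String) (r : List String) :
    pvM t (l :: r) (0 :: (pvS r).map (· + 1)) =
      (t + 1, PySem.Str.strip l ::
          ((r.takeWhile (fun x => !pvHdr x)).map PySem.Str.strip))
        :: pvM (t + 1) r (pvS r) := by
  rw [pvM_cons, pvM_shift]
  congr 1
  simp only [Prod.mk.injEq]
  constructor
  · push_cast; ring
  · rw [List.drop_zero, Nat.sub_zero]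
    cases hS : pvS r with
    | nil =>
        simp only [List.map_nil, List.nil_append, List.headI, List.length_cons]
        rw [List.take_succ_cons, List.take_of_length_le (le_refl _),
          pvS_nil_takeWhile r hS]
        simp
    | cons j js =>
        simp only [List.map_cons, List.cons_append, List.headI]
        rw [List.take_succ_cons, pvS_cons_takeWhile r j js hS]
        simp

-- main invariant: A's loop state vs the boundary-slicing view
theorem pvGoA_eq_pvM : ∀ (xs : List String) (i : Nat),
    (∀ init : Int, pvGoA xs i none init = pvM (i : Int) xs (pvS xs)) ∧
    (∀ (c : List String) (init : Int),
      pvGoA xs i (some c) init =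
        (init, c ++ (xs.takeWhile (fun l => !pvHdr l)).map PySem.Str.strip)
          :: pvM (i : Int) xs (pvS xs)) := by
  intro xs
  induction xs with
  | nil =>
      intro i
      constructor
      · intro init; simp [pvGoA, pvS, pvM]
      · intro c init; simp [pvGoA, pvS, pvM]
  | cons l r ih =>
      intro i
      have hcast : ((i + 1 : Nat) : Int) = (i : Int) + 1 := by push_cast; ring
      by_cases hl : pvHdr l
      · -- header line: emit pending block (if any), start a new one at i+1
        have key : pvGoA r (i + 1) (some [PySem.Str.strip l]) ((i : Int) + 1) =
            pvM (i : Int) (l :: r) (pvS (l :: r)) := by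
          rw [(ih (i + 1)).2 [PySem.Str.strip l] ((i : Int) + 1)]
          simp only [pvS, if_pos hl]
          rw [pvM_cons_zero, hcast]
          simp
        constructor
        · intro init
          simp only [pvGoA, if_pos hl, List.nil_append]
          exact key
        · intro c init
          simp only [pvGoA, if_pos hl, List.nil_append]
          rw [key]
          simp [hl]
      · -- non-header line: keep scanning / keep accumulating
        constructor
        · intro init
          simp only [pvGoA, if_neg hl, List.nil_append]
          rw [(ih (i + 1)).1 init]
          simp only [pvS, if_neg hl]
          rw [hcast, pvM_shift]
        · intro c init
          simp only [pvGoA, if_neg hl, List.nil_append]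
          rw [(ih (i + 1)).2 (c ++ [PySem.Str.strip l]) init]
          simp only [pvS, if_neg hl]
          rw [hcast, pvM_shift]
          simp [hl, List.append_assoc]

-- B's port computes pvM 0 xs (pvS xs)
theorem pvStarts_eq : ∀ (xs : List String) (s : Int),
    (PySem.List.enumerate xs s).filterMap (fun p => if pvHdr p.2 then some p.1 else none) =
      (pvS xs).map (fun j : Nat => s + (j : Int)) := by
  intro xs
  induction xs with
  | nil => intro s; simp [PySem.List.enumerate_nil, pvS]
  | cons l r ih =>
      intro s
      rw [PySem.List.enumerate_cons]
      by_cases hl : pvHdr l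
      · simp only [List.filterMap_cons, hl, if_pos, pvS]
        rw [ih (s + 1), List.map_cons, List.map_map]
        refine congrArg₂ _ (by push_cast; ring) (List.map_congr_left ?_)
        intro j _
        simp only [Function.comp]
        push_cast; ring
      · simp only [List.filterMap_cons, hl, Bool.false_eq_true, if_neg, not_false_iff, pvS]
        rw [ih (s + 1), List.map_map]
        refine List.map_congr_left ?_
        intro j _
        simp only [Function.comp]
        push_cast; ring

theorem alt_eq_pvM (xs : List String) :
    iter_step_lines_alt xs = pvM 0 xs (pvS xs) := by
  unfold iter_step_lines_alt
  dsimp only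
  rw [pvStarts_eq xs 0]
  have h0 : (pvS xs).map (fun j : Nat => (0 : Int) + (j : Int)) =
      (pvS xs).map (fun j : Nat => (j : Int)) := by
    refine List.map_congr_left ?_; intro j _; ring
  rw [h0]
  have hends : ((pvS xs).map (fun j : Nat => (j : Int))).tail ++ [(xs.length : Int)] =
      ((pvS xs).tail ++ [xs.length]).map (fun j : Nat => (j : Int)) := by
    cases pvS xs <;> simp
  rw [hends, List.zip_map]
  unfold pvM
  rw [List.map_map]
  refine List.map_congr_left ?_
  intro p _
  simp only [Function.comp, Prod.map, Prod.mk.injEq]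
  rw [PySem.List.slice_natCast]
  constructor
  · ring
  · rfl

-- ===== VERDICT (by name: the statement is the Claim_ definition above) =====
theorem iter_step_lines_spec : Claim_equal_iter_step_lines := by
  intro xs _
  unfold Spec_iter_step_lines
  rw [alt_eq_pvM]
  have := (pvGoA_eq_pvM xs 0).1 0
  simpa [iter_step_lines] using this
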